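-- pv_equiv track=rewrite | github.com/zhiheng-yang/WDPS | extraction/NER/ner_util.py | predictions_error_modifier
-- ===== SOURCE A (Python) =====
-- def predictions_error_modifier(input_list):
--     mapping = {1: 2, 3: 4, 5: 6, 7: 8}
--     i = 0
--     while i < len(input_list):
--         current_value = input_list[i]
--         replace_value = mapping.get(current_value, None)
--
--         if replace_value is not None:
--             j = i + 1
--             while j < len(input_list) and input_list[j] == current_value:
--                 input_list[j] = replace_value
--                 j += 1
--
--             i = j
--         else:
--             i += 1
--
--     return input_list
-- ===== SOURCE B (Python) =====
-- def predictions_error_modifier(input_list):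
--     # one pass over adjacent pairs: an element is replaced iff it equals
--     # its (original) predecessor and that value is a mapped key
--     mapping = {1: 2, 3: 4, 5: 6, 7: 8}
--     if input_list:
--         input_list[1:] = [
--             mapping[cur] if cur == prev and cur in mapping else cur
--             for prev, cur in zip(input_list, input_list[1:])
--         ]
--     return input_list
-- ===== Notes on version B (the rewrite author's own statement) =====
-- stated objective: idiomatic
-- what changed: Replaces A's nested index-jumping while loops with a single comprehension over adjacent pairs (zip of the list with its tail): an element is replaced iff it equals its original predecessor and is a mapped key; written back with slice assignment to keep the in-place mutation.
import Mathlib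
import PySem

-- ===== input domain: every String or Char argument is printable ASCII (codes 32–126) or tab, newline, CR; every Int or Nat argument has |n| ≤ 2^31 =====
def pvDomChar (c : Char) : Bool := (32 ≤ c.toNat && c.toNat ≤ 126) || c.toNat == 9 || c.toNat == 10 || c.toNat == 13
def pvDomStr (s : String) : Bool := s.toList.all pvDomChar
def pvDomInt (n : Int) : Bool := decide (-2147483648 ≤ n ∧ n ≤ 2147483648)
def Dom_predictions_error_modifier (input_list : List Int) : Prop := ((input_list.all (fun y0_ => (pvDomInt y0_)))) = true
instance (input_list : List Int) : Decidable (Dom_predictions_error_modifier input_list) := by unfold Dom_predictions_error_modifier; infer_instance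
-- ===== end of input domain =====

-- B replaces A's nested index-jumping while loops with one pass over adjacent pairs (more idiomatic, same cost).
-- Both Pythons mutate input_list in place and return it; the D proved here is about the returned value
-- (B performs the same net mutation via slice assignment).

-- ===== PORT A =====
-- mapping = {1: 2, 3: 4, 5: 6, 7: 8}
def pvMapping : PySem.Dict Int Int := PySem.Dict.ofList [(1,2),(3,4),(5,6),(7,8)]

-- inner while loop: while j < len(input_list) and input_list[j] == current_value: input_list[j] = replace_value; j += 1
-- (fuel is only a structural-recursion guard; l.length - j bounds the iterations, so the given fuel is never exhausted)
def pvInnerA : Nat → List Int → Nat → Int → Int → List Int × Nat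
  | 0, l, j, _, _ => (l, j)
  | fuel + 1, l, j, cv, rv =>
      if h : j < l.length then
        if l[j] = cv then pvInnerA fuel (l.set j rv) (j + 1) cv rv
        else (l, j)
      else (l, j)

-- outer while loop over i (fuel likewise a structural guard: i strictly increases each iteration)
def pvOuterA : Nat → List Int → Nat → List Int
  | 0, l, _ => l
  | fuel + 1, l, i =>
      if h : i < l.length then
        match PySem.Dict.get? pvMapping l[i] with
        | some rv => pvOuterA fuel (pvInnerA l.length l (i + 1) l[i] rv).1 (pvInnerA l.length l (i + 1) l[i] rv).2
        | none => pvOuterA fuel l (i + 1)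
      else l

def predictions_error_modifier (input_list : List Int) : List Int :=
  pvOuterA (input_list.length + 1) input_list 0

-- ===== PORT B =====
def predictions_error_modifier_alt (input_list : List Int) : List Int :=
  match input_list with
  | [] => []
  | x :: xs =>
      x :: ((x :: xs).zip xs).map (fun pc =>
        if pc.2 = pc.1 ∧ (PySem.Dict.get? pvMapping pc.2).isSome
        then PySem.Dict.getD pvMapping pc.2 pc.2 else pc.2)

-- ===== PRECONDITION & SPEC =====
def Spec_predictions_error_modifier (input_list : List Int) (out : List Int) : Prop := out = predictions_error_modifier_alt input_list
instance (input_list : List Int) (out : List Int) : Decidable (Spec_predictions_error_modifier input_list out) := by unfold Spec_predictions_error_modifier; infer_instance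

-- ===== CLAIM (what is proved, stated in full; the proofs are below) =====
def Claim_equal_predictions_error_modifier : Prop := ∀ (input_list : List Int), Dom_predictions_error_modifier input_list → Spec_predictions_error_modifier input_list (predictions_error_modifier input_list)

-- ===== LEMMAS AND PROOFS =====



-- functional description of B's per-element rule, threaded with the previous value
def pvG (p : Int) : List Int → List Int
  | [] => []
  | c :: cs =>
      (if c = p ∧ (PySem.Dict.get? pvMapping c).isSome
       then PySem.Dict.getD pvMapping c c else c) :: pvG c cs

-- B-shaped result as a function of the whole list
def pvF : List Int → List Int
  | [] => []
  | x :: xs => x :: pvG x xs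

theorem pvAlt_eq_pvF (l : List Int) : predictions_error_modifier_alt l = pvF l := by
  have hz : ∀ (xs : List Int) (x : Int),
      ((x :: xs).zip xs).map (fun pc =>
        if pc.2 = pc.1 ∧ (PySem.Dict.get? pvMapping pc.2).isSome
        then PySem.Dict.getD pvMapping pc.2 pc.2 else pc.2) = pvG x xs := by
    intro xs
    induction xs with
    | nil => intro x; rfl
    | cons c cs ih =>
        intro x
        rw [show (x :: c :: cs).zip (c :: cs) = (x, c) :: ((c :: cs).zip cs) from rfl]
        rw [List.map_cons, ih c]
        rfl
  cases l with
  | nil => rfl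
  | cons x xs => simp only [predictions_error_modifier_alt, pvF, hz]

theorem pvG_eq_pvF (p : Int) (xs : List Int)
    (h : ∀ c, xs.head? = some c → ¬ (c = p ∧ (PySem.Dict.get? pvMapping c).isSome)) :
    pvG p xs = pvF xs := by
  cases xs with
  | nil => rfl
  | cons c cs =>
      have := h c rfl
      simp only [pvG, pvF, if_neg this]

theorem pvHead_dropWhile (p : Int → Bool) :
    ∀ (xs : List Int) (d : Int), (xs.dropWhile p).head? = some d → p d = false := by
  intro xs
  induction xs with
  | nil => intro d h; simp [List.dropWhile] at h
  | cons a l ih =>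
      intro d h
      by_cases hp : p a
      · rw [List.dropWhile_cons_of_pos hp] at h
        exact ih d h
      · rw [List.dropWhile_cons_of_neg hp] at h
        simp at h
        subst h
        simpa using hp

-- inner loop characterisation: replaces a run of cv's starting at pre.length with rv
theorem pvInnerA_spec (cv rv : Int) (tw : List Int) (htw : ∀ c ∈ tw, c = cv) :
    ∀ (pre dw : List Int) (fuel : Nat), (∀ c, dw.head? = some c → c ≠ cv) → tw.length < fuel →
      pvInnerA fuel (pre ++ tw ++ dw) pre.length cv rv
        = (pre ++ tw.map (fun _ => rv) ++ dw, pre.length + tw.length) := by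
  induction tw with
  | nil =>
      intro pre dw fuel hdw hfuel
      cases fuel with
      | zero => omega
      | succ f =>
          cases dw with
          | nil => simp [pvInnerA]
          | cons d ds =>
              have hd : d ≠ cv := hdw d rfl
              have hlen : pre.length < (pre ++ [] ++ d :: ds).length := by simp
              have hget : (pre ++ [] ++ d :: ds)[pre.length]'hlen = d := by
                simp [List.getElem_append_right]
              simp [pvInnerA, hlen, hget, hd]
  | cons c tw' ih =>
      intro pre dw fuel hdw hfuel
      cases fuel with
      | zero => simp at hfuel
      | succ f =>
          have hc : c = cv := htw c (by simp)
          subst hc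
          have e1 : pre ++ (c :: tw') ++ dw = pre ++ c :: (tw' ++ dw) := by simp
          rw [e1]
          have hlen : pre.length < (pre ++ c :: (tw' ++ dw)).length := by simp
          have hget : (pre ++ c :: (tw' ++ dw))[pre.length]'hlen = c := by
            simp [List.getElem_append_right]
          have hset : (pre ++ c :: (tw' ++ dw)).set pre.length rv
              = (pre ++ [rv]) ++ tw' ++ dw := by
            rw [List.set_append_right _ _ (le_refl _)]
            simp
          show (if h : pre.length < (pre ++ c :: (tw' ++ dw)).length then _ else _) = _
          rw [dif_pos hlen, if_pos hget, hset]
          have hlen1 : pre.length + 1 = (pre ++ [rv]).length := by simp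
          rw [hlen1, ih (fun x hx => htw x (by simp [hx])) (pre ++ [rv]) dw f hdw (by simp at hfuel ⊢; omega)]
          apply Prod.ext <;> simp <;> omega

theorem pvOuterA_split : ∀ (n : Nat) (suf pre : List Int) (fuel : Nat),
    suf.length ≤ n → suf.length < fuel →
    pvOuterA fuel (pre ++ suf) pre.length = pre ++ pvF suf := by
  intro n
  induction n with
  | zero =>
      intro suf pre fuel hle hfuel
      have hsuf : suf = [] := by
        cases suf with | nil => rfl | cons a b => simp at hle
      subst hsuf
      cases fuel with
      | zero => omega
      | succ f => simp [pvOuterA, pvF]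
  | succ n ih =>
      intro suf pre fuel hle hfuel
      cases suf with
      | nil =>
          cases fuel with
          | zero => omega
          | succ f => simp [pvOuterA, pvF]
      | cons x xs =>
          cases fuel with
          | zero => omega
          | succ f =>
          have hlen : pre.length < (pre ++ x :: xs).length := by simp
          have hget : (pre ++ x :: xs)[pre.length]'hlen = x := by
            simp [List.getElem_append_right]
          show (if h : pre.length < (pre ++ x :: xs).length then _ else _) = _
          rw [dif_pos hlen]
          simp only [hget]
          cases hm : PySem.Dict.get? pvMapping x with
          | none =>
              have h2 : pre ++ x :: xs = (pre ++ [x]) ++ xs := by simp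
              have h1 : pre.length + 1 = (pre ++ [x]).length := by simp
              rw [h2, h1, ih xs (pre ++ [x]) f (by simp at hle ⊢; omega) (by simp at hfuel ⊢; omega)]
              have hGF : pvG x xs = pvF xs := by
                apply pvG_eq_pvF
                intro c hc hcond
                rcases hcond with ⟨rfl, hs⟩
                simp [hm] at hs
              simp [pvF, hGF]
          | some rv =>
              have hsplit : xs = xs.takeWhile (fun c => c = x) ++ xs.dropWhile (fun c => c = x) :=
                (List.takeWhile_append_dropWhile).symm
              set tw := xs.takeWhile (fun c => decide (c = x)) with htw_def
              set dw := xs.dropWhile (fun c => decide (c = x)) with hdw_def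
              have htw : ∀ c ∈ tw, c = x := by
                intro c hc
                have := List.mem_takeWhile_imp hc
                simpa using this
              have hdw : ∀ c, dw.head? = some c → c ≠ x := by
                intro c hc
                have := pvHead_dropWhile (fun c => decide (c = x)) xs c hc
                simpa using this
              have harr : pre ++ x :: xs = (pre ++ [x]) ++ tw ++ dw := by
                conv_lhs => rw [hsplit]
                simp
              have hlen1 : pre.length + 1 = (pre ++ [x]).length := by simp
              dsimp only
              rw [harr, hlen1, pvInnerA_spec x rv tw htw (pre ++ [x]) dw _ hdw (by simp; omega)]
              have h2 : (pre ++ [x]) ++ tw.map (fun _ => rv) ++ dw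
                  = ((pre ++ [x]) ++ tw.map (fun _ => rv)) ++ dw := by simp
              have h3 : (pre ++ [x]).length + tw.length
                  = ((pre ++ [x]) ++ tw.map (fun _ => rv)).length := by simp; omega
              have hdwlen : dw.length ≤ n := by
                have h4 : dw.length ≤ xs.length := by
                  conv_rhs => rw [hsplit]
                  simp
                simp at hle; omega
              have hdwfuel : dw.length < f := by
                have h4 : dw.length ≤ xs.length := by
                  conv_rhs => rw [hsplit]
                  simp
                simp at hfuel; omega
              rw [h2, h3, ih dw ((pre ++ [x]) ++ tw.map (fun _ => rv)) f hdwlen hdwfuel]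
              have hG : ∀ (t : List Int), (∀ c ∈ t, c = x) →
                  pvG x (t ++ dw) = t.map (fun _ => rv) ++ pvF dw := by
                intro t
                induction t with
                | nil =>
                    intro _
                    apply pvG_eq_pvF
                    intro c hc hcond
                    exact hdw c hc hcond.1
                | cons c t' iht =>
                    intro hall
                    have hcx : c = x := hall c (by simp)
                    subst hcx
                    simp [pvG, hm, PySem.Dict.getD, iht (fun y hy => hall y (by simp [hy]))]
              have hxs : pvF (x :: xs) = x :: pvG x (tw ++ dw) := by
                conv_lhs => rw [hsplit]
                simp [pvF]
              simp [hxs, hG tw htw]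

theorem predictions_error_modifier_spec : Claim_equal_predictions_error_modifier := by
  intro l _
  unfold Spec_predictions_error_modifier
  rw [pvAlt_eq_pvF]
  have := pvOuterA_split l.length l [] (l.length + 1) (le_refl _) (by omega)
  simpa [predictions_error_modifier] using this
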